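-- pv_equiv track=rewrite | github.com/sharryberry12/BatteryOptimisationFYP | ieee_13_bus_openDSS.py | assign_customers_to_buses
-- ===== SOURCE A (Python) =====
-- LV_ZONES = ["632", "671", "675", "652", "634"]
--
-- def assign_customers_to_buses(customer_ids, lv_zones=LV_ZONES):
--     """
--     Distribute customers round-robin across LV zones and 3 phases.
--
--     Returns:
--         mapping: dict {customer_id: (zone_bus, phase)}
--             zone_bus ∈ LV_ZONES (e.g. "632", "671", ...)
--             phase ∈ {1, 2, 3}
--     """
--     ids = sorted(customer_ids)
--     mapping = {}
--     n_zones = len(lv_zones)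
--     for i, cid in enumerate(ids):
--         phase = (i % 3) + 1                        # cycle 1, 2, 3
--         zone_idx = (i // 3) % n_zones               # cycle through zones
--         mapping[cid] = (lv_zones[zone_idx], phase)
--     return mapping
-- ===== SOURCE B (Python) =====
-- LV_ZONES = ["632", "671", "675", "652", "634"]
--
-- def assign_customers_to_buses(customer_ids, lv_zones=LV_ZONES):
--     """
--     Distribute customers round-robin across LV zones and 3 phases.
--
--     Builds the cyclic list of (zone, phase) slots by nested loops over
--     zones and phases, then zips it with the sorted customer ids.
--     """
--     ids = sorted(customer_ids)
--     slots = []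
--     while len(slots) < len(ids):
--         for zone in lv_zones:
--             for phase in (1, 2, 3):
--                 slots.append((zone, phase))
--     return dict(zip(ids, slots))
-- ===== Notes on version B (the rewrite author's own statement) =====
-- stated objective: alternative
-- what changed: Instead of computing a zone index and phase from each position with i//3 and i%3, B generates the cyclic (zone, phase) slot sequence with nested loops over zones and phases and zips it with the sorted ids.
import Mathlib
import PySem

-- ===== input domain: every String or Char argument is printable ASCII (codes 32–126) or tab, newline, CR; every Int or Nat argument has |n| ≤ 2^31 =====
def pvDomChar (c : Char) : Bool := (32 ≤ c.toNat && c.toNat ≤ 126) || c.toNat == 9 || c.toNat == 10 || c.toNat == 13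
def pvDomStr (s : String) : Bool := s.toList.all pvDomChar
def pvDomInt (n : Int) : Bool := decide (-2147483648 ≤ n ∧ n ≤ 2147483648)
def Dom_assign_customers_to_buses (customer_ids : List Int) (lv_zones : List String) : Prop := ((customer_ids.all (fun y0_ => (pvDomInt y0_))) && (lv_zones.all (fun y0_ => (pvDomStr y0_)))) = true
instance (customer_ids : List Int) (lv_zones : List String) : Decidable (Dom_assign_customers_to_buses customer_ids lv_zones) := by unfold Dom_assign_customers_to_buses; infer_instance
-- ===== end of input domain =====

-- B replaces A's per-index div/mod arithmetic by generating the cyclic (zone, phase)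
-- slot sequence with nested loops and zipping it with the sorted ids (objective: alternative).

-- ===== PORT A =====
def assign_customers_to_buses (customer_ids : List Int) (lv_zones : List String) : List (Int × String × Int) :=
  let ids := PySem.List.sorted customer_ids (fun x => x) false
  let n_zones : Int := lv_zones.length
  ((PySem.List.enumerate ids 0).foldl
    (fun (m : PySem.Dict Int (String × Int)) p =>
      let phase := PySem.Int.mod p.1 3 + 1
      let zone_idx := PySem.Int.mod (PySem.Int.floordiv p.1 3) n_zones
      -- lv_zones[zone_idx]: under Pre_ the index is in range; getD "" only totalises
      m.insert p.2 ((PySem.List.pyGet? lv_zones zone_idx).getD "", phase))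
    PySem.Dict.empty).items

-- ===== PORT B =====
-- one round of the while-loop body: for zone in lv_zones: for phase in (1,2,3): append
def pvBlock (zones : List String) : List (String × Int) :=
  zones.flatMap (fun z => [(z, 1), (z, 2), (z, 3)])

theorem pvBlock_length (zones : List String) : (pvBlock zones).length = 3 * zones.length := by
  induction zones with
  | nil => simp [pvBlock]
  | cons z zs ih => simp [pvBlock] at ih ⊢; omega

-- 'while len(slots) < len(ids): …' (the zones ≠ [] conjunct only totalises: Python diverges there)
def pvBuildSlots (zones : List String) (n : Nat) (acc : List (String × Int)) : List (String × Int) :=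
  if h : acc.length < n ∧ zones ≠ [] then
    pvBuildSlots zones n (acc ++ pvBlock zones)
  else acc
termination_by n - acc.length
decreasing_by
  have h1 := pvBlock_length zones
  have h2 : zones.length ≠ 0 := fun hz => h.2 (List.eq_nil_of_length_eq_zero hz)
  simp only [List.length_append]
  omega

def assign_customers_to_buses_alt (customer_ids : List Int) (lv_zones : List String) : List (Int × String × Int) :=
  let ids := PySem.List.sorted customer_ids (fun x => x) false
  let slots := pvBuildSlots lv_zones ids.length []
  ((ids.zip slots).foldl
    (fun (m : PySem.Dict Int (String × Int)) p => m.insert p.1 p.2)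
    PySem.Dict.empty).items

-- ===== PRECONDITION & SPEC =====
-- Pre_ excludes only the inputs where A raises ZeroDivisionError: a nonempty customer
-- list with an empty zone list (there B's while-loop would not terminate either).
def Pre_assign_customers_to_buses (customer_ids : List Int) (lv_zones : List String) : Prop :=
  customer_ids = [] ∨ lv_zones ≠ []
instance (customer_ids : List Int) (lv_zones : List String) : Decidable (Pre_assign_customers_to_buses customer_ids lv_zones) := by unfold Pre_assign_customers_to_buses; infer_instance

def pvWitness_assign_customers_to_buses : List Int × List String := ([3, 1, 2, 1], ["632", "671"])

def Spec_assign_customers_to_buses (customer_ids : List Int) (lv_zones : List String) (out : List (Int × String × Int)) : Prop := out = assign_customers_to_buses_alt customer_ids lv_zones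
instance (customer_ids : List Int) (lv_zones : List String) (out : List (Int × String × Int)) : Decidable (Spec_assign_customers_to_buses customer_ids lv_zones out) := by unfold Spec_assign_customers_to_buses; infer_instance

-- ===== CLAIM (what is proved, stated in full; the proofs are below) =====
def Claim_equal_assign_customers_to_buses : Prop := ∀ (customer_ids : List Int) (lv_zones : List String), Dom_assign_customers_to_buses customer_ids lv_zones → Pre_assign_customers_to_buses customer_ids lv_zones → Spec_assign_customers_to_buses customer_ids lv_zones (assign_customers_to_buses customer_ids lv_zones)

-- ===== LEMMAS AND PROOFS =====

-- a fold of keyed inserts is the fold of plain inserts over the mapped pair list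
theorem pv_foldl_insert_map {α : Type} (k : α → Int) (v : α → String × Int)
    (l : List α) (d : PySem.Dict Int (String × Int)) :
    l.foldl (fun m p => m.insert (k p) (v p)) d
      = (l.map (fun p => (k p, v p))).foldl (fun m q => m.insert q.1 q.2) d := by
  induction l generalizing d with
  | nil => rfl
  | cons x xs ih => simp [List.foldl_cons, ih]

theorem pv_enum_getElem? {α : Type} (xs : List α) (s : Int) (i : Nat) :
    (PySem.List.enumerate xs s)[i]? = xs[i]?.map (fun x => (s + (i : Int), x)) := by
  induction xs generalizing s i with
  | nil => simp [PySem.List.enumerate]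
  | cons x xs ih =>
    cases i with
    | zero => simp [PySem.List.enumerate_cons]
    | succ j =>
      rw [PySem.List.enumerate_cons]
      simp only [List.getElem?_cons_succ, ih]
      cases xs[j]? with
      | none => simp
      | some v =>
        simp only [Option.map_some, Option.some.injEq, Prod.mk.injEq]
        exact ⟨by push_cast; ring, trivial⟩

theorem pv_block_getElem? (zones : List String) (j : Nat) :
    (pvBlock zones)[j]? = zones[j / 3]?.map (fun z => (z, ((j % 3 : Nat) : Int) + 1)) := by
  induction zones generalizing j with
  | nil => simp [pvBlock]
  | cons z zs ih =>
    match j with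
    | 0 => simp [pvBlock]
    | 1 => simp [pvBlock]
    | 2 => simp [pvBlock]
    | (j + 3) =>
      have h3 : (j + 3) / 3 = j / 3 + 1 := by omega
      have h4 : (j + 3) % 3 = j % 3 := by omega
      simp only [pvBlock, List.flatMap_cons] at ih ⊢
      simp only [List.cons_append, List.nil_append, List.getElem?_cons_succ, h3, h4]
      exact ih j

theorem pv_flatten_replicate_getElem? {α : Type} (k : Nat) (p : List α) (i : Nat)
    (h : i < k * p.length) :
    ((List.replicate k p).flatten)[i]? = p[i % p.length]? := by
  induction k generalizing i with
  | zero => omega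
  | succ m ih =>
    rw [Nat.succ_mul] at h
    simp only [List.replicate_succ, List.flatten_cons]
    by_cases hi : i < p.length
    · rw [List.getElem?_append_left hi, Nat.mod_eq_of_lt hi]
    · rw [List.getElem?_append_right (by omega)]
      rw [ih (i - p.length) (by omega)]
      congr 1
      conv_rhs => rw [Nat.mod_eq_sub_mod (show i ≥ p.length by omega)]

-- the while-loop produces some number of whole blocks, enough to cover n
theorem pv_buildSlots_spec (zones : List String) (hz : zones ≠ []) :
    ∀ (n : Nat) (acc : List (String × Int)), ∃ k,
      pvBuildSlots zones n acc = acc ++ (List.replicate k (pvBlock zones)).flatten ∧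
      n ≤ acc.length + k * (3 * zones.length) := by
  intro n
  have hzl : zones.length ≠ 0 := fun hl => hz (List.eq_nil_of_length_eq_zero hl)
  suffices H : ∀ (f : Nat) (acc : List (String × Int)), n - acc.length ≤ f → ∃ k,
      pvBuildSlots zones n acc = acc ++ (List.replicate k (pvBlock zones)).flatten ∧
      n ≤ acc.length + k * (3 * zones.length) by
    exact fun acc => H (n - acc.length) acc le_rfl
  intro f
  induction f with
  | zero =>
    intro acc hf
    refine ⟨0, ?_, by omega⟩
    rw [pvBuildSlots, dif_neg (by omega)]
    simp
  | succ f ih =>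
    intro acc hf
    by_cases h : acc.length < n ∧ zones ≠ []
    · obtain ⟨k, h1, h2⟩ := ih (acc ++ pvBlock zones)
        (by simp only [List.length_append, pvBlock_length]; omega)
      refine ⟨k + 1, ?_, ?_⟩
      · rw [pvBuildSlots, dif_pos h, h1, List.replicate_succ, List.flatten_cons]
        simp
      · simp only [List.length_append, pvBlock_length] at h2
        rw [Nat.succ_mul]
        omega
    · refine ⟨0, ?_, ?_⟩
      · rw [pvBuildSlots, dif_neg h]; simp
      · rw [not_and_or] at h
        rcases h with h | h
        · omega
        · exact absurd hz (by simpa using h)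

theorem pv_idx_arith (i nz : Nat) (h : 0 < nz) :
    i % (3 * nz) / 3 = i / 3 % nz ∧ i % (3 * nz) % 3 = i % 3 := by
  have hr : i % 3 < 3 := Nat.mod_lt _ (by norm_num)
  have ha : i / 3 % nz < nz := Nat.mod_lt _ h
  have e1 := Nat.div_add_mod i 3
  have e2 := Nat.div_add_mod (i / 3) nz
  have key := Nat.mul_add_mod (3 * nz) (i / 3 / nz) (3 * (i / 3 % nz) + i % 3)
  have h3 : 3 * nz * (i / 3 / nz) = 3 * (nz * (i / 3 / nz)) := by ring
  have heq : 3 * nz * (i / 3 / nz) + (3 * (i / 3 % nz) + i % 3) = i := by omega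
  rw [heq] at key
  have klt : (3 * (i / 3 % nz) + i % 3) % (3 * nz) = 3 * (i / 3 % nz) + i % 3 :=
    Nat.mod_eq_of_lt (by omega)
  omega

-- the common value assigned to position i (established for both ports below)
theorem pv_slots_getElem? (lv_zones : List String) (hz : lv_zones ≠ []) (n : Nat) (i : Nat)
    (hi : i < n) :
    (pvBuildSlots lv_zones n [])[i]? =
      some (lv_zones[i / 3 % lv_zones.length]'(Nat.mod_lt _ (List.length_pos_of_ne_nil hz)),
            ((i % 3 : Nat) : Int) + 1) := by
  have hnz : 0 < lv_zones.length := List.length_pos_of_ne_nil hz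
  obtain ⟨k, h1, h2⟩ := pv_buildSlots_spec lv_zones hz n []
  simp only [List.nil_append, List.length_nil, Nat.zero_add] at h1 h2
  rw [h1]
  rw [pv_flatten_replicate_getElem? k (pvBlock lv_zones) i (by rw [pvBlock_length]; omega)]
  rw [pvBlock_length, pv_block_getElem?]
  obtain ⟨e1, e2⟩ := pv_idx_arith i lv_zones.length hnz
  rw [e1, e2, List.getElem?_eq_getElem (Nat.mod_lt _ hnz)]
  rfl

theorem pv_slots_length (lv_zones : List String) (hz : lv_zones ≠ []) (n : Nat) :
    n ≤ (pvBuildSlots lv_zones n []).length := by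
  obtain ⟨k, h1, h2⟩ := pv_buildSlots_spec lv_zones hz n []
  simp only [List.nil_append, List.length_nil, Nat.zero_add] at h1 h2
  rw [h1, List.length_flatten]
  simp only [List.map_replicate, List.sum_replicate, smul_eq_mul, pvBlock_length]
  omega

-- ===== VERDICT (by name: the statement is the Claim_ definition above) =====
theorem assign_customers_to_buses_spec : Claim_equal_assign_customers_to_buses := by
  intro customer_ids lv_zones _ hpre
  unfold Spec_assign_customers_to_buses
  rcases hpre with hnil | hz
  · subst hnil; rfl
  · have hnz : 0 < lv_zones.length := List.length_pos_of_ne_nil hz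
    unfold assign_customers_to_buses assign_customers_to_buses_alt
    dsimp only
    congr 1
    rw [pv_foldl_insert_map (fun (p : Int × Int) => p.2)
      (fun (p : Int × Int) => ((PySem.List.pyGet? lv_zones
          (PySem.Int.mod (PySem.Int.floordiv p.1 3) ((lv_zones.length : Nat) : Int))).getD "",
        PySem.Int.mod p.1 3 + 1))]
    congr 1
    set ids := PySem.List.sorted customer_ids (fun x => x) false with hids
    have hlen : ids.length ≤ (pvBuildSlots lv_zones ids.length []).length := pv_slots_length lv_zones hz ids.length
    apply List.ext_getElem?
    intro i
    rw [List.getElem?_map, pv_enum_getElem?]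
    by_cases hn : i < ids.length
    · have hlt : i < (pvBuildSlots lv_zones ids.length []).length := Nat.lt_of_lt_of_le hn hlen
      have hz2 : (ids.zip (pvBuildSlots lv_zones ids.length []))[i]? =
          some (ids[i], (pvBuildSlots lv_zones ids.length [])[i]) :=
        List.getElem?_zip_eq_some.mpr ⟨List.getElem?_eq_getElem hn, List.getElem?_eq_getElem hlt⟩
      have hslot : (pvBuildSlots lv_zones ids.length [])[i] =
          (lv_zones[i / 3 % lv_zones.length]'(Nat.mod_lt _ hnz), ((i % 3 : Nat) : Int) + 1) := by
        have h' := pv_slots_getElem? lv_zones hz ids.length i hn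
        rw [List.getElem?_eq_getElem hlt] at h'
        exact Option.some.inj h'
      rw [hz2, hslot, List.getElem?_eq_getElem hn]
      simp only [Option.map_some, Option.some.injEq, Prod.mk.injEq, zero_add]
      refine ⟨trivial, ?_, ?_⟩
      · have hfd : PySem.Int.floordiv (i : Int) 3 = ((i / 3 : Nat) : Int) := by
          exact_mod_cast PySem.Int.floordiv_natCast i 3
        have hmnz : PySem.Int.mod ((i / 3 : Nat) : Int) ((lv_zones.length : Nat) : Int) =
            ((i / 3 % lv_zones.length : Nat) : Int) := PySem.Int.mod_natCast _ _
        rw [hfd, hmnz, PySem.List.pyGet?_natCast,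
          List.getElem?_eq_getElem (Nat.mod_lt _ hnz), Option.getD_some]
      · have hm3 : PySem.Int.mod (i : Int) 3 = ((i % 3 : Nat) : Int) := by
          exact_mod_cast PySem.Int.mod_natCast i 3
        rw [hm3]
    · rw [List.getElem?_eq_none (by omega)]
      simp only [Option.map_none]
      symm
      apply List.getElem?_eq_none
      rw [List.length_zip]
      omega
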